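-- pv_equiv track=rewrite | github.com/jason-dio-so/inca-rag-final | apps/api/app/contracts/ux_message_codes.py | validate_ux_message_code_naming
-- ===== SOURCE A (Python) =====
-- def validate_ux_message_code_naming(code: str) -> bool:
--     """
--     Validate UX message code naming convention.
--
--     Args:
--         code: UX message code to validate
--
--     Returns:
--         True if code follows UPPER_SNAKE_CASE convention
--
--     Usage:
--         Used in STEP 26 contract tests to enforce naming rules.
--
--     Example:
--         >>> validate_ux_message_code_naming("COVERAGE_MATCH")
--         True
--         >>> validate_ux_message_code_naming("coverage_match")
--         False
--         >>> validate_ux_message_code_naming("CoverageMatch")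
--         False
--     """
--     if not code:
--         return False
--
--     # Must be uppercase letters, digits, and underscores only
--     if not all(c.isupper() or c.isdigit() or c == '_' for c in code):
--         return False
--
--     # Must not start/end with underscore
--     if code.startswith('_') or code.endswith('_'):
--         return False
--
--     # Must not have consecutive underscores
--     if '__' in code:
--         return False
--
--     return True
-- ===== SOURCE B (Python) =====
-- def validate_ux_message_code_naming(code: str) -> bool:
--     # Single left-to-right pass (finite-state scan): track whether the previous
--     # position was an underscore boundary (virtually true before the start).
--     prev_us = True
--     for c in code:
--         if c == '_':
--             if prev_us:
--                 return False
--             prev_us = True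
--         elif c.isupper() or c.isdigit():
--             prev_us = False
--         else:
--             return False
--     return not prev_us
-- ===== Notes on version B (the rewrite author's own statement) =====
-- stated objective: alternative
-- what changed: Replaced A's four separate checks (per-char scan, startswith, endswith, '__' substring search) by one left-to-right finite-state pass tracking whether the previous position was an underscore boundary.
import Mathlib
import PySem

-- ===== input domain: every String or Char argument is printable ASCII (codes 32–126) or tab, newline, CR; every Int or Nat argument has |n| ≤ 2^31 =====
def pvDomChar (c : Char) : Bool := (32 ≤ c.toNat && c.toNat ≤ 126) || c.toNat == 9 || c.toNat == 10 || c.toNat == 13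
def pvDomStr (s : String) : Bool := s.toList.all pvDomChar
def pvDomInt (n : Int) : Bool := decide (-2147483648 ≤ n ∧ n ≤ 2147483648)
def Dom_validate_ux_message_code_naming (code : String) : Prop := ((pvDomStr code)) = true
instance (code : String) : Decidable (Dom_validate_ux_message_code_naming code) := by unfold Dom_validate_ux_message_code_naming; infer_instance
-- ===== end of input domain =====

-- B replaces A's four separate checks by one single-pass finite-state scan (alternative decomposition).

-- ===== PORT A =====
def validate_ux_message_code_naming (code : String) : Bool :=
  if code.toList = [] then false
  else if !(code.toList.all (fun c => PySem.Chars.isupper c || PySem.Chars.isdigit c || c == '_')) then false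
  else if PySem.Str.startswith code "_" || PySem.Str.endswith code "_" then false
  else if PySem.Str.isIn "__" code then false
  else true

-- ===== PORT B =====
-- one pass over the characters; prevUs = "previous position was an underscore boundary"
def altGo : List Char → Bool → Bool
  | [], prevUs => !prevUs
  | c :: rest, prevUs =>
    if c = '_' then
      if prevUs then false else altGo rest true
    else if PySem.Chars.isupper c || PySem.Chars.isdigit c then
      altGo rest false
    else false

def validate_ux_message_code_naming_alt (code : String) : Bool :=
  altGo code.toList true

-- ===== PRECONDITION & SPEC =====
def Spec_validate_ux_message_code_naming (code : String) (out : Bool) : Prop := out = validate_ux_message_code_naming_alt code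
instance (code : String) (out : Bool) : Decidable (Spec_validate_ux_message_code_naming code out) := by unfold Spec_validate_ux_message_code_naming; infer_instance

-- ===== CLAIM (what is proved, stated in full; the proofs are below) =====
def Claim_equal_validate_ux_message_code_naming : Prop := ∀ (code : String), Dom_validate_ux_message_code_naming code → Spec_validate_ux_message_code_naming code (validate_ux_message_code_naming code)

-- ===== LEMMAS AND PROOFS =====

lemma prefix_singleton_iff_head (c : Char) (l : List Char) : [c] <+: l ↔ l.head? = some c := by
  cases l with
  | nil => simp
  | cons a t => simp [List.cons_prefix_cons, eq_comm]

lemma suffix_singleton_cons (c a : Char) (t : List Char) (ht : t ≠ []) :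
    ([c] <:+ a :: t ↔ [c] <:+ t) := by
  constructor
  · rintro ⟨u, hu⟩
    cases u with
    | nil => simp at hu; exact absurd hu.2 ht
    | cons x v => exact ⟨v, by simpa using congrArg List.tail hu⟩
  · rintro ⟨u, hu⟩; exact ⟨a :: u, by simp [hu]⟩

lemma altGo_char (l : List Char) (hl : l ≠ []) (b : Bool) :
    altGo l b =
      (l.all (fun c => PySem.Chars.isupper c || PySem.Chars.isdigit c || c == '_')
        && !decide (['_', '_'] <:+: l)
        && (!b || !decide (l.head? = some '_'))
        && !decide (['_'] <:+ l)) := by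
  induction l generalizing b with
  | nil => exact absurd rfl hl
  | cons c rest ih =>
    by_cases hc : c = '_'
    · subst hc
      cases b with
      | true => simp [altGo]
      | false =>
        by_cases hr : rest = []
        · subst hr; simp [altGo]
        · have := ih hr true
          simp only [altGo, if_neg (by simp : ¬ (false = true)), this]
          have hinf : (['_', '_'] <:+: '_' :: rest) ↔ (rest.head? = some '_' ∨ ['_', '_'] <:+: rest) := by
            rw [List.infix_cons_iff]
            constructor
            · rintro (h | h)
              · left
                rw [List.cons_prefix_cons] at h
                exact (prefix_singleton_iff_head _ _).mp h.2
              · right; exact h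
            · rintro (h | h)
              · left
                rw [List.cons_prefix_cons]
                exact ⟨rfl, (prefix_singleton_iff_head _ _).mpr h⟩
              · right; exact h
          have hsuf := suffix_singleton_cons '_' '_' rest hr
          simp only [List.all_cons, hinf, hsuf]
          by_cases h1 : rest.head? = some '_' <;>
          by_cases h2 : (['_', '_'] <:+: rest) <;>
          by_cases h3 : (['_'] <:+ rest) <;>
            simp [h1, h2, h3, PySem.Chars.isupper, PySem.Chars.isdigit]
    · by_cases hgood : (PySem.Chars.isupper c || PySem.Chars.isdigit c) = true
      · by_cases hr : rest = []
        · subst hr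
          simp [altGo, hc, hgood, Ne.symm hc, List.suffix_cons_iff, List.infix_cons_iff,
                List.prefix_cons_iff]
        · have := ih hr false
          simp only [altGo, if_neg hc, if_pos hgood, this]
          have hinf : (['_', '_'] <:+: c :: rest) ↔ (['_', '_'] <:+: rest) := by
            rw [List.infix_cons_iff]
            constructor
            · rintro (h | h)
              · rw [List.cons_prefix_cons] at h
                exact absurd h.1.symm hc
              · exact h
            · exact Or.inr
          have hsuf := suffix_singleton_cons '_' c rest hr
          have hhead : ¬ ((c :: rest).head? = some '_') := by simp [hc]
          simp only [List.all_cons, hinf, hsuf, hgood]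
          by_cases h2 : (['_', '_'] <:+: rest) <;>
          by_cases h3 : (['_'] <:+ rest) <;>
            simp [h2, h3, hhead, hgood, hc]
      · simp only [altGo, if_neg hc, if_neg hgood, List.all_cons]
        simp only [Bool.or_eq_true, not_or] at hgood
        simp [hgood.1, hgood.2, hc]

lemma bool_eq_decide (b : Bool) (P : Prop) [Decidable P] (h : b = true ↔ P) : b = decide P := by
  cases b <;> simp_all

theorem validate_ux_message_code_naming_spec' (code : String) :
    validate_ux_message_code_naming code = validate_ux_message_code_naming_alt code := by
  by_cases h : code.toList = []
  · simp [validate_ux_message_code_naming, validate_ux_message_code_naming_alt, h, altGo]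
  · unfold validate_ux_message_code_naming validate_ux_message_code_naming_alt
    rw [altGo_char _ h true, if_neg h]
    have hstart : PySem.Str.startswith code "_" = decide (code.toList.head? = some '_') := by
      rw [PySem.Str.startswith_eq]
      exact bool_eq_decide _ _
        ((PySem.Chars.startswith_iff code.toList "_".toList).trans
          (by simpa using prefix_singleton_iff_head '_' code.toList))
    have hend : PySem.Str.endswith code "_" = decide (['_'] <:+ code.toList) := by
      rw [PySem.Str.endswith_eq]
      exact bool_eq_decide _ _
        ((PySem.Chars.endswith_iff code.toList "_".toList).trans (by simp))
    have hin : PySem.Str.isIn "__" code = decide (['_', '_'] <:+: code.toList) := by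
      exact bool_eq_decide _ _ ((PySem.Str.isIn_iff_infix "__" code).trans (by simp))
    rw [hstart, hend, hin]
    by_cases h1 : code.toList.all (fun c => PySem.Chars.isupper c || PySem.Chars.isdigit c || c == '_') <;>
    by_cases h2 : code.toList.head? = some '_' <;>
    by_cases h3 : (['_'] <:+ code.toList) <;>
    by_cases h4 : (['_', '_'] <:+: code.toList) <;>
      simp [h1, h2, h3, h4]

-- ===== VERDICT (by name: the statement is the Claim_ definition above) =====
theorem validate_ux_message_code_naming_spec : Claim_equal_validate_ux_message_code_naming := by
  intro code _
  unfold Spec_validate_ux_message_code_naming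
  exact validate_ux_message_code_naming_spec' code
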